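-- pv_equiv track=rewrite | github.com/AsoFC/Disertatie | extra_diff_ev.py | to_matrix
-- ===== SOURCE A (Python) =====
-- def to_matrix(S):
--     mat = []
--     header = []
--     for key in S:
--         header.append(key)
--         for i in range(len(S[key])):
--             if len(mat) < i + 1:
--                 mat.append([])
--             mat[i].append(S[key][i])
--     return mat, header
-- ===== SOURCE B (Python) =====
-- def to_matrix(S):
--     header = list(S)
--     cols = list(S.values())
--     maxlen = max(map(len, cols), default=0)
--     mat = [[c[i] for c in cols if i < len(c)] for i in range(maxlen)]
--     return mat, header
-- ===== Notes on version B (the rewrite author's own statement) =====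
-- stated objective: simpler
-- what changed: Replaces A's incremental column-major growth (appending each value to its row, padding mat with the len(mat)<i+1 guard inside a nested loop) by computing the extent maxlen up front and building the matrix row-major with one comprehension per row.
import Mathlib
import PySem

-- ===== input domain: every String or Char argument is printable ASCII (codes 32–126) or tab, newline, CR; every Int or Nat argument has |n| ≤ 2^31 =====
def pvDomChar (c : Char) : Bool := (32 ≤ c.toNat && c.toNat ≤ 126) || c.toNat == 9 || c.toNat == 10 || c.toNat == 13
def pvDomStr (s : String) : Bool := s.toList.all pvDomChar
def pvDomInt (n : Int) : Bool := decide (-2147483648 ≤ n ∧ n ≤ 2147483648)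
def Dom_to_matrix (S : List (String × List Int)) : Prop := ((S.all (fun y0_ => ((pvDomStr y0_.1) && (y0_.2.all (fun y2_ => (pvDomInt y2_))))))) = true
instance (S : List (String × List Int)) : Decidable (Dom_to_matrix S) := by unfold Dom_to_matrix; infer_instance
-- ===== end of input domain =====

-- B builds the matrix row-major from a precomputed extent instead of A's incremental
-- column-major growth with padding; same return value, objective: simpler.

-- ===== PORT A =====
-- inner loop body: for i in range(len(vs)): if len(mat) < i+1: mat.append([]); mat[i].append(vs[i])
def pvStepA (vs : List Int) (mat : List (List Int)) (i : Nat) : List (List Int) :=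
  let mat := if mat.length < i + 1 then mat ++ [[]] else mat
  mat.modify i (fun r => r ++ [vs.getD i 0])   -- vs[i]: i < len vs always, so getD is exact

-- 'for key in S' over the dict: fold over its items in insertion order (keys unique,
-- so kv.2 is exactly S[key])
def to_matrix (S : List (String × List Int)) : List (List Int) × List String :=
  (PySem.Dict.ofList S).items.foldl
    (fun acc kv =>
      ((List.range kv.2.length).foldl (pvStepA kv.2) acc.1, acc.2 ++ [kv.1]))
    ([], [])

-- ===== PORT B =====
-- row i = [c[i] for c in cols if i < len(c)]
def pvRowB (cols : List (List Int)) (i : Nat) : List Int :=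
  cols.filterMap (fun col => col[i]?)

def pvBuildB (cols : List (List Int)) : List (List Int) :=
  (List.range ((cols.map List.length).foldl max 0)).map (pvRowB cols)

def to_matrix_alt (S : List (String × List Int)) : List (List Int) × List String :=
  let d := PySem.Dict.ofList S
  (pvBuildB d.values, d.keys)

-- ===== PRECONDITION & SPEC =====
def Spec_to_matrix (S : List (String × List Int)) (out : List (List Int) × List String) : Prop := out = to_matrix_alt S
instance (S : List (String × List Int)) (out : List (List Int) × List String) : Decidable (Spec_to_matrix S out) := by unfold Spec_to_matrix; infer_instance

-- ===== CLAIM (what is proved, stated in full; the proofs are below) =====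
def Claim_equal_to_matrix : Prop := ∀ (S : List (String × List Int)), Dom_to_matrix S → Spec_to_matrix S (to_matrix S)

-- ===== LEMMAS AND PROOFS =====

-- one column added to a ragged matrix, as A's inner loop produces it
def pvAddCol (mat : List (List Int)) (vs : List Int) : List (List Int) :=
  (List.range (max mat.length vs.length)).map
    (fun i => mat.getD i [] ++ if i < vs.length then [vs.getD i 0] else [])

-- A's mat accumulator, detached from the header
def pvMatFold (cols : List (List Int)) : List (List Int) :=
  cols.foldl (fun m vs => (List.range vs.length).foldl (pvStepA vs) m) []

lemma pv_pairFold (L : List (String × List Int)) (acc : List (List Int) × List String) :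
    L.foldl (fun acc kv =>
      ((List.range kv.2.length).foldl (pvStepA kv.2) acc.1, acc.2 ++ [kv.1])) acc
    = ((L.map Prod.snd).foldl (fun m vs => (List.range vs.length).foldl (pvStepA vs) m) acc.1,
       acc.2 ++ L.map Prod.fst) := by
  induction L generalizing acc with
  | nil => simp
  | cons kv L ih => simp [ih]

lemma pv_getD_range_map (mat : List (List Int)) :
    (List.range mat.length).map (fun i => mat[i]?.getD []) = mat := by
  apply List.ext_getElem
  · simp
  · intro i h1 h2
    simp [List.getElem?_eq_getElem h2]

lemma pv_inner (vs : List Int) (mat : List (List Int)) (n : Nat) (hn : n ≤ vs.length) :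
    (List.range n).foldl (pvStepA vs) mat
    = (List.range (max mat.length n)).map
        (fun i => mat.getD i [] ++ if i < n then [vs.getD i 0] else []) := by
  induction n with
  | zero =>
      simp only [List.range_zero, List.foldl_nil, Nat.max_zero, Nat.not_lt_zero,
        if_false, List.append_nil]
      exact (pv_getD_range_map mat).symm
  | succ n ih =>
      rw [List.range_succ, List.foldl_append, ih (by omega)]
      apply List.ext_getElem
      · simp only [List.foldl_cons, List.foldl_nil, pvStepA, List.length_modify,
          apply_ite List.length, List.length_append, List.length_map, List.length_range,
          List.length_singleton]
        split_ifs <;> omega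
      · intro j hj hj'
        simp only [List.foldl_cons, List.foldl_nil, pvStepA]
        simp only [List.length_map, List.length_range] at hj' ⊢
        split_ifs with hc
        · -- padding fired: mat.length ≤ n
          have hMn : mat.length ≤ n := by omega
          rw [List.getElem_modify, List.getElem_map, List.getElem_range]
          rcases eq_or_ne n j with rfl | hjn
          · rw [if_pos rfl, List.getElem_append_right (by simp; omega)]
            have h1 : mat.getD n ([] : List Int) = [] := by
              rw [List.getD_eq_getElem?_getD, List.getElem?_eq_none hMn]; rfl
            simp only [List.length_map, List.length_range, Nat.max_eq_right hMn, Nat.sub_self,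
              List.getElem_cons_zero, h1, List.nil_append, if_pos (Nat.lt_succ_self n)]
          · rw [if_neg hjn]
            have hjn' : j < n := by omega
            rw [List.getElem_append_left (by simp; omega), List.getElem_map, List.getElem_range,
              if_pos hjn', if_pos (by omega : j < n + 1)]
        · -- no padding: n < mat.length
          have hMn : n < mat.length := by omega
          rw [List.getElem_modify, List.getElem_map, List.getElem_range]
          rcases eq_or_ne n j with rfl | hjn
          · rw [if_pos rfl, List.getElem_map, List.getElem_range]
            simp
          · rw [if_neg hjn, List.getElem_map, List.getElem_range]
            by_cases hjn' : j < n
            · rw [if_pos hjn', if_pos (by omega : j < n + 1)]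
            · rw [if_neg hjn', if_neg (by omega : ¬ j < n + 1)]

lemma pv_len_le_maxlen (cols : List (List Int)) (c : List Int) (hc : c ∈ cols) :
    c.length ≤ (cols.map List.length).foldl max 0 :=
  (PySem.List.le_foldl_max (cols.map List.length) 0).2 c.length (List.mem_map_of_mem hc)

lemma pv_rowB_nil (cols : List (List Int)) (i : Nat)
    (hi : (cols.map List.length).foldl max 0 ≤ i) : pvRowB cols i = [] := by
  simp only [pvRowB, List.filterMap_eq_nil_iff]
  intro c hc
  exact List.getElem?_eq_none (le_trans (pv_len_le_maxlen cols c hc) hi)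

lemma pv_buildB_getD (cols : List (List Int)) (i : Nat) :
    (pvBuildB cols).getD i [] = pvRowB cols i := by
  by_cases hi : i < (cols.map List.length).foldl max 0
  · rw [List.getD_eq_getElem?_getD]
    simp [pvBuildB, hi]
  · rw [List.getD_eq_getElem?_getD, List.getElem?_eq_none (by simp [pvBuildB]; omega),
      pv_rowB_nil cols i (by omega)]
    rfl

lemma pv_buildB_step (cols : List (List Int)) (vs : List Int) :
    pvBuildB (cols ++ [vs]) = pvAddCol (pvBuildB cols) vs := by
  have hlen : ((cols ++ [vs]).map List.length).foldl max 0
      = max ((cols.map List.length).foldl max 0) vs.length := by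
    rw [List.map_append, List.foldl_append]; rfl
  apply List.ext_getElem
  · simp [pvBuildB, pvAddCol, hlen]
  · intro j hj hj'
    simp only [pvBuildB, hlen, List.getElem_map, List.getElem_range, pvAddCol]
    have hget := pv_buildB_getD cols j
    simp only [pvBuildB] at hget
    rw [hget]
    simp only [pvRowB, List.filterMap_append, List.filterMap]
    by_cases hjv : j < vs.length
    · simp [hjv, List.getD_eq_getElem?_getD]
    · simp [hjv]

lemma pv_matFold_eq (cols : List (List Int)) : pvMatFold cols = pvBuildB cols := by
  induction cols using List.reverseRecOn with
  | nil => simp [pvMatFold, pvBuildB]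
  | append_singleton cols vs ih =>
      rw [pvMatFold, List.foldl_append, ← pvMatFold, ih, List.foldl_cons, List.foldl_nil,
        pv_inner vs (pvBuildB cols) vs.length le_rfl, pv_buildB_step]
      rfl

-- ===== VERDICT (by name: the statement is the Claim_ definition above) =====
theorem to_matrix_spec : Claim_equal_to_matrix := by
  intro S _
  show to_matrix S = to_matrix_alt S
  rw [to_matrix, to_matrix_alt, pv_pairFold]
  refine Prod.ext ?_ (by simp [PySem.Dict.keys])
  show pvMatFold _ = _
  rw [pv_matFold_eq]
  rfl
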